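-- pv_equiv track=rewrite | github.com/MSandovalM/myadvento2025 | 6.py | split_into_grid_columns
-- ===== SOURCE A (Python) =====
-- from typing import List, Tuple
--
-- def split_into_grid_columns(block: str) -> List[List[str]]:
--     lines = block
--     if not lines:
--         return []
--
--     # 1) Pad to same length (so indexing lines[i] is safe)
--     width = max(len(l) for l in lines)
--     padded = [l.ljust(width) for l in lines]
--
--     # 2) Positions that are spaces in ALL lines => separators
--     all_space = [all(p[i] == " " for p in padded) for i in range(width)]
--
--     # Find runs of separator positions (usually 1-char runs)
--     runs: List[Tuple[int, int]] = []
--     i = 0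
--     while i < width:
--         if all_space[i]:
--             j = i
--             while j < width and all_space[j]:
--                 j += 1
--             runs.append((i, j))
--             i = j
--         else:
--             i += 1
--
--     # 3) Build cut points around separator runs
--     cuts = {0, width}
--     for a, b in runs:
--         cuts.add(a)  # cut before separator run
--         cuts.add(b)  # cut after separator run
--     cuts = sorted(cuts)
--
--     # 4) Create segments between cuts, skipping pure-separator segments
--     segments = []
--     for s, e in zip(cuts, cuts[1:]):
--         if s < e and all(all_space[k] for k in range(s, e)):
--             continue
--         segments.append((s, e))
--
--     # 5) Extract column-groups (one group = same slice from each line)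
--     groups = []
--     for s, e in segments:
--         groups.append([p[s:e] for p in padded])
--
--     return groups
-- ===== SOURCE B (Python) =====
-- from typing import List
--
--
-- def split_into_grid_columns(block: str) -> List[List[str]]:
--     lines = block
--     if not lines:
--         return []
--
--     width = max(len(l) for l in lines)
--     padded = [l.ljust(width) for l in lines]
--
--     # One direct pass over columns: open a segment at the first content
--     # column, close it at the next all-space column (or at the end).
--     segs = []
--     start = None
--     for i in range(width):
--         sep = all(p[i] == " " for p in padded)
--         if sep:
--             if start is not None:
--                 segs.append((start, i))
--                 start = None
--         elif start is None:
--             start = i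
--     if start is not None:
--         segs.append((start, width))
--
--     return [[p[s:e] for p in padded] for s, e in segs]
-- ===== Notes on version B (the rewrite author's own statement) =====
-- stated objective: simpler
-- what changed: B replaces A's four-stage pipeline (find separator-column runs with nested while loops, build a cut-point set, sort it, then filter pure-separator segments out of the adjacent cut pairs) by a single left-to-right pass over columns that opens a segment at the first content column and closes it at the next all-space column, emitting the segments directly.
import Mathlib
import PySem

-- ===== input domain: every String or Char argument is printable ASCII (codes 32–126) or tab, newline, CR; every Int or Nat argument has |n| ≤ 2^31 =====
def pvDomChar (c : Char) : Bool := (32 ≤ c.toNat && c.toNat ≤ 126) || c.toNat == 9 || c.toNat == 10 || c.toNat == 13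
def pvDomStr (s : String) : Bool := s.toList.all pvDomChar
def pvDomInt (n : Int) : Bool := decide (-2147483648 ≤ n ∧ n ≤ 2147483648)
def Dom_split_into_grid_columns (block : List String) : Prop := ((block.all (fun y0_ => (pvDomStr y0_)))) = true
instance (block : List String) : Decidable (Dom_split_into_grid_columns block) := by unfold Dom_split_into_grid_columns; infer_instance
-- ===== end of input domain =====

-- B replaces A's runs/cut-set/sort/filter pipeline by one direct pass over columns
-- that opens a segment at the first content column and closes it at the next
-- all-space column; same return value, different decomposition.

-- ===== PORT A =====

-- inner `while j < width and all_space[j]: j += 1`: number of leading True entries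
def pvTakeTrue : List Bool → Nat
  | [] => 0
  | true :: r => pvTakeTrue r + 1
  | false :: _ => 0

-- outer `while i < width` loop of step 2 of A, walking the all_space list
def pvRunsGo : List Bool → Nat → List (Nat × Nat)
  | [], _ => []
  | false :: rest, i => pvRunsGo rest (i + 1)
  | true :: rest, i =>
    (i, i + 1 + pvTakeTrue rest) ::
      pvRunsGo (rest.drop (pvTakeTrue rest)) (i + 1 + pvTakeTrue rest)
termination_by m _ => m.length
decreasing_by all_goals (try (have h := List.length_drop (l := rest) (i := pvTakeTrue rest))); all_goals simp_all; all_goals omega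

-- step 3 of A: cuts = {0, width}; add both run endpoints; sorted
def pvCuts (width : Nat) (runs : List (Nat × Nat)) : List Nat :=
  PySem.List.sorted
    (runs.foldl (fun c ab => PySem.Set.add (PySem.Set.add c ab.1) ab.2)
      (PySem.Set.ofList [0, width]))
    (fun x => x) false

-- step 4 of A: keep adjacent cut pairs that are not pure-separator
-- (range(s,e) ported as List.range' s (e-s); all indices are < mask.length so getD is exact)
def pvSegsA (mask : List Bool) (cuts : List Nat) : List (Nat × Nat) :=
  (cuts.zip cuts.tail).foldl
    (fun segs se =>
      if decide (se.1 < se.2) && (List.range' se.1 (se.2 - se.1)).all (fun k => mask.getD k false) then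
        segs
      else segs ++ [se]) []

-- l.ljust(width) ported by hand as pad-with-spaces on the char list (exact); p[i] is in range
def split_into_grid_columns (block : List String) : List (List String) :=
  if block = [] then []
  else
    let width : Nat := ((block.map (fun l => l.toList.length)).max?).getD 0
    let padded : List (List Char) :=
      block.map (fun l => l.toList ++ List.replicate (width - l.toList.length) ' ')
    let allSpace : List Bool :=
      (List.range width).map (fun i => padded.all (fun p => p.getD i ' ' == ' '))
    let runs := pvRunsGo allSpace 0
    let cuts := pvCuts width runs
    let segments := pvSegsA allSpace cuts
    segments.map (fun se => padded.map (fun p => String.mk ((p.drop se.1).take (se.2 - se.1))))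

-- ===== PORT B =====

-- loop body of B's single pass: state = (segments so far, open segment start)
def pvStep (sep : Nat → Bool) (st : List (Nat × Nat) × Option Nat) (i : Nat) :
    List (Nat × Nat) × Option Nat :=
  if sep i then
    match st.2 with
    | some s => (st.1 ++ [(s, i)], none)
    | none => st
  else
    match st.2 with
    | none => (st.1, some i)
    | some _ => st

def split_into_grid_columns_alt (block : List String) : List (List String) :=
  if block = [] then []
  else
    let width : Nat := ((block.map (fun l => l.toList.length)).max?).getD 0
    let padded : List (List Char) :=
      block.map (fun l => l.toList ++ List.replicate (width - l.toList.length) ' ')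
    let st := (List.range width).foldl
      (pvStep (fun i => padded.all (fun p => p.getD i ' ' == ' '))) ([], none)
    let segs := match st.2 with
      | some s => st.1 ++ [(s, width)]
      | none => st.1
    segs.map (fun se => padded.map (fun p => String.mk ((p.drop se.1).take (se.2 - se.1))))

-- ===== PRECONDITION & SPEC =====
def Spec_split_into_grid_columns (block : List String) (out : List (List String)) : Prop := out = split_into_grid_columns_alt block
instance (block : List String) (out : List (List String)) : Decidable (Spec_split_into_grid_columns block out) := by unfold Spec_split_into_grid_columns; infer_instance

-- ===== CLAIM (what is proved, stated in full; the proofs are below) =====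
def Claim_equal_split_into_grid_columns : Prop := ∀ (block : List String), Dom_split_into_grid_columns block → Spec_split_into_grid_columns block (split_into_grid_columns block)

-- ===== LEMMAS AND PROOFS =====

-- number of leading False entries
def pvTakeFalse : List Bool → Nat
  | [] => 0
  | false :: r => pvTakeFalse r + 1
  | true :: _ => 0

-- the maximal runs of False (content columns) of a mask, with offset
def pvFr : List Bool → Nat → List (Nat × Nat)
  | [], _ => []
  | true :: r, i => pvFr r (i + 1)
  | false :: r, i =>
    (i, i + 1 + pvTakeFalse r) :: pvFr (r.drop (pvTakeFalse r)) (i + 1 + pvTakeFalse r)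
termination_by m _ => m.length
decreasing_by all_goals (try (have h := List.length_drop (l := r) (i := pvTakeFalse r))); all_goals simp_all; all_goals omega

def pvFinish (w : Nat) (st : List (Nat × Nat) × Option Nat) : List (Nat × Nat) :=
  match st.2 with
  | some s => st.1 ++ [(s, w)]
  | none => st.1

-- run-endpoint chain invariant
def pvChain : Nat → List (Nat × Nat) → Nat → Prop
  | lo, [], hi => lo ≤ hi
  | lo, (a, b) :: rs, hi => lo ≤ a ∧ a < b ∧ pvChain b rs hi

-- rebuild the mask from its True-runs
def pvBuild : Nat → List (Nat × Nat) → Nat → List Bool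
  | lo, [], hi => List.replicate (hi - lo) false
  | lo, (a, b) :: rs, hi =>
    List.replicate (a - lo) false ++ List.replicate (b - a) true ++ pvBuild b rs hi

-- the sorted cut list, written directly
def pvCutsFrom : Nat → List (Nat × Nat) → Nat → List Nat
  | lo, [], hi => if lo < hi then [lo, hi] else [lo]
  | lo, (a, b) :: rs, hi => (if lo < a then [lo] else []) ++ a :: pvCutsFrom b rs hi

-- the gaps between runs = the content segments
def pvGaps : Nat → List (Nat × Nat) → Nat → List (Nat × Nat)
  | lo, [], hi => if lo < hi then [(lo, hi)] else []
  | lo, (a, b) :: rs, hi => (if lo < a then [(lo, a)] else []) ++ pvGaps b rs hi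

theorem pvFr_nil (i : Nat) : pvFr [] i = [] := by rw [pvFr.eq_def]

theorem pvFr_true_cons (r : List Bool) (i : Nat) : pvFr (true :: r) i = pvFr r (i + 1) := by
  rw [pvFr.eq_def]

theorem pvFr_false_cons (r : List Bool) (i : Nat) :
    pvFr (false :: r) i = (i, i + 1 + pvTakeFalse r) :: pvFr (r.drop (pvTakeFalse r)) (i + 1 + pvTakeFalse r) := by
  rw [pvFr.eq_def]

theorem pvChain_le : ∀ rs lo hi, pvChain lo rs hi → lo ≤ hi := by
  intro rs
  induction rs with
  | nil => intro lo hi h; exact h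
  | cons p rs ih =>
    intro lo hi h
    obtain ⟨h1, h2, h3⟩ := h
    have := ih p.2 hi h3
    omega

theorem pvChain_mem : ∀ rs lo hi, pvChain lo rs hi → ∀ p ∈ rs, lo ≤ p.1 ∧ p.1 < p.2 ∧ p.2 ≤ hi := by
  intro rs
  induction rs with
  | nil => intro lo hi _ p hp; simp at hp
  | cons q rs ih =>
    intro lo hi h p hp
    obtain ⟨h1, h2, h3⟩ := h
    rw [List.mem_cons] at hp
    rcases hp with rfl | hp
    · exact ⟨h1, h2, pvChain_le rs _ _ h3⟩
    · have := ih q.2 hi h3 p hp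
      omega

theorem pvTakeTrue_le : ∀ r, pvTakeTrue r ≤ r.length := by
  intro r
  induction r with
  | nil => simp [pvTakeTrue]
  | cons b r ih => cases b <;> simp [pvTakeTrue] <;> omega

theorem pvChain_weaken : ∀ rs lo lo' hi, lo' ≤ lo → pvChain lo rs hi → pvChain lo' rs hi := by
  intro rs lo lo' hi hle h
  cases rs with
  | nil => simp [pvChain] at *; omega
  | cons p rs =>
    obtain ⟨h1, h2, h3⟩ := h
    exact ⟨by omega, h2, h3⟩

theorem pvRunsGo_chain : ∀ m i, pvChain i (pvRunsGo m i) (i + m.length) := by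
  intro m i
  induction m, i using pvRunsGo.induct with
  | case1 i => simp [pvRunsGo, pvChain]
  | case2 rest i ih =>
    rw [pvRunsGo]
    have e : i + (rest.length + 1) = i + 1 + rest.length := by omega
    rw [List.length_cons, e]
    exact pvChain_weaken _ _ _ _ (by omega) ih
  | case3 rest i ih =>
    rw [pvRunsGo]
    refine ⟨le_refl i, by omega, ?_⟩
    have ht := pvTakeTrue_le rest
    have e : i + 1 + pvTakeTrue rest + (rest.drop (pvTakeTrue rest)).length
        = i + (true :: rest).length := by
      rw [List.length_drop]; simp; omega
    rw [← e]
    exact ih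

theorem pvTakeTrue_prefix : ∀ r, List.replicate (pvTakeTrue r) true ++ r.drop (pvTakeTrue r) = r := by
  intro r
  induction r with
  | nil => simp [pvTakeTrue]
  | cons b r ih =>
    cases b
    · simp [pvTakeTrue]
    · simp [pvTakeTrue, List.replicate_succ, ih]

theorem pvBuild_cons_false : ∀ rs lo hi, pvChain (lo + 1) rs hi →
    pvBuild lo rs hi = false :: pvBuild (lo + 1) rs hi := by
  intro rs lo hi h
  cases rs with
  | nil =>
    simp only [pvChain] at h
    simp only [pvBuild]
    have e : hi - lo = (hi - (lo + 1)) + 1 := by omega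
    rw [e, List.replicate_succ]
  | cons p rs =>
    obtain ⟨h1, h2, h3⟩ := h
    obtain ⟨a, b⟩ := p
    simp only [pvBuild]
    have e : a - lo = (a - (lo + 1)) + 1 := by omega
    rw [e, List.replicate_succ]
    simp

theorem pvBuild_spec : ∀ m i, pvBuild i (pvRunsGo m i) (i + m.length) = m := by
  intro m i
  induction m, i using pvRunsGo.induct with
  | case1 i => simp [pvRunsGo, pvBuild]
  | case2 rest i ih =>
    rw [pvRunsGo]
    have hc := pvRunsGo_chain rest (i + 1)
    have e : i + (false :: rest).length = i + 1 + rest.length := by simp; omega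
    rw [e, pvBuild_cons_false _ _ _ hc, ih]
  | case3 rest i ih =>
    rw [pvRunsGo]
    have ht := pvTakeTrue_le rest
    simp only [pvBuild, Nat.sub_self, List.replicate_zero, List.nil_append]
    have e2 : i + (true :: rest).length = (i + 1 + pvTakeTrue rest) + (rest.drop (pvTakeTrue rest)).length := by
      rw [List.length_drop]; simp; omega
    rw [e2, ih]
    have e3 : i + 1 + pvTakeTrue rest - i = pvTakeTrue rest + 1 := by omega
    rw [e3, List.replicate_succ]
    simp [pvTakeTrue_prefix]

theorem pvBuild_getD : ∀ rs lo hi k, pvChain lo rs hi → lo ≤ k → k < hi →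
    ((pvBuild lo rs hi).getD (k - lo) false = true ↔ ∃ p ∈ rs, p.1 ≤ k ∧ k < p.2) := by
  intro rs
  induction rs with
  | nil =>
    intro lo hi k h hlk hkh
    simp only [pvChain] at h
    simp only [pvBuild]
    rw [List.getD_eq_getElem?_getD, List.getElem?_replicate]
    have hk : k - lo < hi - lo := by omega
    simp [hk]
  | cons p rs ih =>
    intro lo hi k h hlk hkh
    obtain ⟨a, b⟩ := p
    obtain ⟨h1, h2, h3⟩ := h
    have hmem := pvChain_mem rs b hi h3
    simp only [pvBuild]
    rw [List.getD_eq_getElem?_getD]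
    by_cases hka : k < a
    · rw [List.getElem?_append_left (by
        rw [List.length_append, List.length_replicate, List.length_replicate]; omega)]
      rw [List.getElem?_append_left (by rw [List.length_replicate]; omega)]
      rw [List.getElem?_replicate]
      rw [if_pos (by omega : k - lo < a - lo)]
      simp only [Option.getD_some]
      constructor
      · intro hfalse; exact absurd hfalse (by simp)
      · rintro ⟨q, hq, hcov1, hcov2⟩
        rw [List.mem_cons] at hq
        rcases hq with rfl | hq
        · omega
        · have := hmem q hq; omega
    · by_cases hkb : k < b
      · rw [List.getElem?_append_left (by
          rw [List.length_append, List.length_replicate, List.length_replicate]; omega)]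
        rw [List.getElem?_append_right (by rw [List.length_replicate]; omega)]
        rw [List.length_replicate, List.getElem?_replicate]
        rw [if_pos (by omega : k - lo - (a - lo) < b - a)]
        simp only [Option.getD_some, true_iff]
        exact ⟨(a, b), by simp, by omega, hkb⟩
      · rw [List.getElem?_append_right (by
          rw [List.length_append, List.length_replicate, List.length_replicate]; omega)]
        rw [List.length_append, List.length_replicate, List.length_replicate]
        have e : k - lo - (a - lo + (b - a)) = k - b := by omega
        rw [e, ← List.getD_eq_getElem?_getD]
        rw [ih b hi k h3 (by omega) hkh, List.exists_mem_cons_iff]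
        constructor
        · intro hx; exact Or.inr hx
        · rintro (⟨hc1, hc2⟩ | hx)
          · simp at hc2; omega
          · exact hx

theorem pvCutsFrom_cons : ∀ rs lo hi, pvChain lo rs hi → ∃ t, pvCutsFrom lo rs hi = lo :: t := by
  intro rs lo hi h
  cases rs with
  | nil =>
    simp only [pvCutsFrom]
    by_cases hlt : lo < hi
    · exact ⟨[hi], by rw [if_pos hlt]⟩
    · exact ⟨[], by rw [if_neg hlt]⟩
  | cons p rs =>
    obtain ⟨a, b⟩ := p
    obtain ⟨h1, h2, h3⟩ := h
    simp only [pvCutsFrom]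
    by_cases hlt : lo < a
    · exact ⟨a :: pvCutsFrom b rs hi, by rw [if_pos hlt]; simp⟩
    · have : lo = a := by omega
      subst this
      exact ⟨pvCutsFrom b rs hi, by rw [if_neg hlt]; simp⟩

theorem pvCutsFrom_mem : ∀ rs lo hi, pvChain lo rs hi →
    ∀ x, (x ∈ pvCutsFrom lo rs hi ↔ x = lo ∨ x = hi ∨ ∃ p ∈ rs, x = p.1 ∨ x = p.2) := by
  intro rs
  induction rs with
  | nil =>
    intro lo hi h x
    simp only [pvChain] at h
    simp only [pvCutsFrom]
    by_cases hlt : lo < hi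
    · rw [if_pos hlt]; simp
    · have : lo = hi := by omega
      subst this
      rw [if_neg hlt]; simp
  | cons p rs ih =>
    intro lo hi h x
    obtain ⟨a, b⟩ := p
    obtain ⟨h1, h2, h3⟩ := h
    simp only [pvCutsFrom]
    rw [List.mem_append, List.mem_cons, ih b hi h3 x, List.exists_mem_cons_iff]
    have hsplit : x ∈ (if lo < a then [lo] else []) ↔ (lo < a ∧ x = lo) := by
      split <;> simp_all
    rw [hsplit]
    generalize (∃ p ∈ rs, x = p.1 ∨ x = p.2) = E
    by_cases hlt : lo < a
    · simp only [hlt, true_and]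
      tauto
    · have heq : lo = a := by omega
      subst heq
      simp only [hlt, false_and, false_or]
      tauto

theorem pvCutsFrom_pairwise : ∀ rs lo hi, pvChain lo rs hi →
    (pvCutsFrom lo rs hi).Pairwise (· < ·) := by
  intro rs
  induction rs with
  | nil =>
    intro lo hi h
    simp only [pvChain] at h
    simp only [pvCutsFrom]
    by_cases hlt : lo < hi
    · rw [if_pos hlt]; simp [hlt]
    · rw [if_neg hlt]; simp
  | cons p rs ih =>
    intro lo hi h
    obtain ⟨a, b⟩ := p
    obtain ⟨h1, h2, h3⟩ := h
    have hC := ih b hi h3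
    have hmem : ∀ x ∈ pvCutsFrom b rs hi, b ≤ x := by
      intro x hx
      rw [pvCutsFrom_mem rs b hi h3 x] at hx
      have hle := pvChain_le rs b hi h3
      rcases hx with rfl | rfl | ⟨q, hq, hx⟩
      · omega
      · omega
      · have := pvChain_mem rs b hi h3 q hq
        rcases hx with rfl | rfl <;> omega
    simp only [pvCutsFrom]
    by_cases hlt : lo < a
    · rw [if_pos hlt]
      simp only [List.singleton_append, List.pairwise_cons]
      refine ⟨?_, ?_, hC⟩
      · intro x hx
        rw [List.mem_cons] at hx
        rcases hx with rfl | hx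
        · omega
        · have := hmem x hx; omega
      · intro x hx
        have := hmem x hx; omega
    · rw [if_neg hlt]
      simp only [List.nil_append, List.pairwise_cons]
      refine ⟨?_, hC⟩
      intro x hx
      have := hmem x hx; omega

theorem pvCuts_eq : ∀ rs width, pvChain 0 rs width → pvCuts width rs = pvCutsFrom 0 rs width := by
  have memS : ∀ (rs : List (Nat × Nat)) (c : PySem.Set Nat) x,
      (x ∈ rs.foldl (fun c ab => PySem.Set.add (PySem.Set.add c ab.1) ab.2) c ↔
        x ∈ c ∨ ∃ p ∈ rs, x = p.1 ∨ x = p.2) := by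
    intro rs
    induction rs with
    | nil => intro c x; simp
    | cons p rs ih =>
      intro c x
      rw [List.foldl_cons, ih, List.exists_mem_cons_iff]
      simp only [PySem.Set.mem_add]
      generalize (∃ p ∈ rs, x = p.1 ∨ x = p.2) = E
      tauto
  have nodupS : ∀ (rs : List (Nat × Nat)) (c : PySem.Set Nat), c.Nodup →
      (rs.foldl (fun c ab => PySem.Set.add (PySem.Set.add c ab.1) ab.2) c).Nodup := by
    intro rs
    induction rs with
    | nil => intro c hc; exact hc
    | cons p rs ih =>
      intro c hc
      exact ih _ (PySem.Set.nodup_add _ _ (PySem.Set.nodup_add _ _ hc))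
  intro rs width hch
  unfold pvCuts
  apply PySem.List.sorted_eq_of_perm_of_pairwise_lt
  · rw [List.perm_ext_iff_of_nodup]
    · intro x
      rw [pvCutsFrom_mem rs 0 width hch x, memS]
      simp only [PySem.Set.mem_ofList, List.mem_cons, List.mem_singleton, List.not_mem_nil, or_false]
      generalize (∃ p ∈ rs, x = p.1 ∨ x = p.2) = E
      tauto
    · exact (pvCutsFrom_pairwise rs 0 width hch).imp (fun h => Nat.ne_of_lt h)
    · exact nodupS rs _ (PySem.Set.nodup_ofList _)
  · exact pvCutsFrom_pairwise rs 0 width hch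

theorem pvSegsA_filter : ∀ (m : List Bool) (cuts : List Nat),
    pvSegsA m cuts = (cuts.zip cuts.tail).filter
      (fun se => !(decide (se.1 < se.2) && (List.range' se.1 (se.2 - se.1)).all (fun k => m.getD k false))) := by
  have gen : ∀ (P : Nat × Nat → Bool) (l : List (Nat × Nat)) (acc : List (Nat × Nat)),
      l.foldl (fun segs se => if P se then segs else segs ++ [se]) acc =
        acc ++ l.filter (fun se => !P se) := by
    intro P l
    induction l with
    | nil => intro acc; simp
    | cons a l ih =>
      intro acc
      rw [List.foldl_cons]
      cases hP : P a <;> simp [hP, ih]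
  intro m cuts
  unfold pvSegsA
  rw [gen]
  simp

theorem pvTakeFalse_replicate_append : ∀ n (x : List Bool), x.head? ≠ some false →
    pvTakeFalse (List.replicate n false ++ x) = n := by
  intro n x hx
  induction n with
  | zero =>
    simp only [List.replicate_zero, List.nil_append]
    cases x with
    | nil => simp [pvTakeFalse]
    | cons b r =>
      cases b with
      | false => simp at hx
      | true => simp [pvTakeFalse]
  | succ n ih => simp [List.replicate_succ, pvTakeFalse, ih]

theorem pvFr_false_prefix : ∀ n (x : List Bool) lo, x.head? ≠ some false →
    pvFr (List.replicate n false ++ x) lo =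
      (if 0 < n then [(lo, lo + n)] else []) ++ pvFr x (lo + n) := by
  intro n x lo hx
  cases n with
  | zero =>
    simp only [List.replicate_zero, List.nil_append, Nat.lt_irrefl, Nat.add_zero]
    simp
  | succ n =>
    have ht : pvTakeFalse (List.replicate n false ++ x) = n := pvTakeFalse_replicate_append n x hx
    rw [List.replicate_succ, List.cons_append, pvFr_false_cons, ht]
    have hd : (List.replicate n false ++ x).drop n = x := by
      have := List.drop_left (l₁ := List.replicate n false) (l₂ := x)
      simpa using this
    rw [hd]
    have e : lo + 1 + n = lo + (n + 1) := by omega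
    rw [e]
    simp

theorem pvFr_true_prefix : ∀ n (x : List Bool) lo, pvFr (List.replicate n true ++ x) lo = pvFr x (lo + n) := by
  intro n
  induction n with
  | zero => simp
  | succ n ih =>
    intro x lo
    rw [List.replicate_succ, List.cons_append, pvFr_true_cons, ih]
    congr 1
    omega

theorem pvFr_build : ∀ rs lo hi, pvChain lo rs hi → pvFr (pvBuild lo rs hi) lo = pvGaps lo rs hi := by
  intro rs
  induction rs with
  | nil =>
    intro lo hi h
    simp only [pvChain] at h
    simp only [pvBuild, pvGaps]
    have hfr := pvFr_false_prefix (hi - lo) [] lo (by simp)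
    rw [List.append_nil] at hfr
    rw [hfr]
    simp only [pvFr_nil, List.append_nil]
    by_cases hlt : lo < hi
    · rw [if_pos (by omega : 0 < hi - lo), if_pos hlt]
      have e : lo + (hi - lo) = hi := by omega
      rw [e]
    · rw [if_neg (by omega : ¬ 0 < hi - lo), if_neg hlt]
  | cons p rs ih =>
    intro lo hi h
    obtain ⟨a, b⟩ := p
    obtain ⟨h1, h2, h3⟩ := h
    simp only [pvBuild, pvGaps]
    have hh : (List.replicate (b - a) true ++ pvBuild b rs hi).head? ≠ some false := by
      have e : b - a = (b - a - 1) + 1 := by omega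
      rw [e, List.replicate_succ]
      simp
    rw [List.append_assoc, pvFr_false_prefix _ _ _ hh, pvFr_true_prefix]
    have e1 : lo + (a - lo) = a := by omega
    have e2 : a + (b - a) = b := by omega
    rw [e1, e2, ih b hi h3]
    by_cases hlt : lo < a
    · rw [if_pos (by omega : 0 < a - lo), if_pos hlt]
    · rw [if_neg (by omega : ¬ 0 < a - lo), if_neg hlt]

theorem pvSegs_gaps : ∀ rs lo hi (m : List Bool), pvChain lo rs hi →
    (∀ p ∈ rs, ∀ k, p.1 ≤ k → k < p.2 → m.getD k false = true) →
    (∀ k, lo ≤ k → k < hi → (∀ p ∈ rs, k < p.1 ∨ p.2 ≤ k) → m.getD k false = false) →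
    pvSegsA m (pvCutsFrom lo rs hi) = pvGaps lo rs hi := by
  intro rs
  induction rs with
  | nil =>
    intro lo hi m h hyp2 hyp3
    simp only [pvChain] at h
    rw [pvSegsA_filter]
    simp only [pvCutsFrom]
    by_cases hlt : lo < hi
    · rw [if_pos hlt]
      have hm : m.getD lo false = false := hyp3 lo le_rfl hlt (by simp)
      simp [List.filter_cons, pvGaps, hlt]
      exact ⟨lo, le_rfl, by omega, by rw [← List.getD_eq_getElem?_getD]; exact hm⟩
    · rw [if_neg hlt]
      simp [pvGaps, hlt]
  | cons p rs ih =>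
    intro lo hi m h hyp2 hyp3
    obtain ⟨a, b⟩ := p
    obtain ⟨h1, h2, h3⟩ := h
    obtain ⟨C', hC⟩ := pvCutsFrom_cons rs b hi h3
    have hmem := pvChain_mem rs b hi h3
    have hble := pvChain_le rs b hi h3
    have hyp3' : ∀ k, b ≤ k → k < hi → (∀ q ∈ rs, k < q.1 ∨ q.2 ≤ k) → m.getD k false = false := by
      intro k hk1 hk2 hfree
      refine hyp3 k (by omega) hk2 ?_
      intro q hq
      rw [List.mem_cons] at hq
      rcases hq with rfl | hq
      · right; simp; omega
      · exact hfree q hq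
    have hrec : (List.filter
        (fun se => !(decide (se.1 < se.2) && (List.range' se.1 (se.2 - se.1)).all (fun k => m.getD k false)))
        (List.zip (b :: C') C')) = pvGaps b rs hi := by
      have hh := ih b hi m h3 (fun q hq => hyp2 q (List.mem_cons_of_mem _ hq)) hyp3'
      rw [pvSegsA_filter, hC] at hh
      simpa using hh
    simp only [pvCutsFrom, hC, pvGaps]
    by_cases hlt : lo < a
    · rw [if_pos hlt, if_pos hlt]
      have hm : m.getD lo false = false := by
        refine hyp3 lo le_rfl (by omega) ?_
        intro q hq
        rw [List.mem_cons] at hq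
        rcases hq with rfl | hq
        · left; simpa using hlt
        · have := hmem q hq; left; omega
      rw [pvSegsA_filter]
      simp only [List.singleton_append, List.tail_cons, List.zip_cons_cons]
      rw [List.filter_cons_of_pos (by
            simp
            exact Or.inr ⟨lo, ⟨le_rfl, by omega⟩, by rw [← List.getD_eq_getElem?_getD]; exact hm⟩),
          List.filter_cons_of_neg (by
            simp
            refine ⟨h2, ?_⟩
            intro x hx1 hx2
            rw [← List.getD_eq_getElem?_getD]
            exact hyp2 (a, b) (by simp) x hx1 (by omega))]
      rw [hrec]
    · have heq : lo = a := by omega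
      subst heq
      rw [if_neg hlt, if_neg hlt]
      rw [pvSegsA_filter]
      simp only [List.nil_append, List.tail_cons, List.zip_cons_cons]
      rw [List.filter_cons_of_neg (by
            simp
            refine ⟨h2, ?_⟩
            intro x hx1 hx2
            rw [← List.getD_eq_getElem?_getD]
            exact hyp2 (lo, b) (by simp) x hx1 (by omega))]
      rw [hrec]

-- A's segments equal the maximal content runs
theorem pvA_main : ∀ m : List Bool,
    pvSegsA m (pvCuts m.length (pvRunsGo m 0)) = pvFr m 0 := by
  intro m
  have hch0 : pvChain 0 (pvRunsGo m 0) m.length := by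
    have h := pvRunsGo_chain m 0
    rwa [Nat.zero_add] at h
  have hb : pvBuild 0 (pvRunsGo m 0) m.length = m := by
    have h := pvBuild_spec m 0
    rwa [Nat.zero_add] at h
  rw [pvCuts_eq _ _ hch0]
  rw [pvSegs_gaps (pvRunsGo m 0) 0 m.length m hch0 ?_ ?_]
  · rw [← pvFr_build (pvRunsGo m 0) 0 m.length hch0, hb]
  · intro p hp k hk1 hk2
    have hmemp := pvChain_mem _ _ _ hch0 p hp
    have h := (pvBuild_getD (pvRunsGo m 0) 0 m.length k hch0 (Nat.zero_le k) (by omega)).mpr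
      ⟨p, hp, hk1, hk2⟩
    rwa [hb, Nat.sub_zero] at h
  · intro k hk0 hkh hfree
    cases hmb : m.getD k false with
    | false => rfl
    | true =>
      have h := (pvBuild_getD (pvRunsGo m 0) 0 m.length k hch0 (Nat.zero_le k) hkh).mp
        (by rwa [hb, Nat.sub_zero])
      obtain ⟨q, hq, hc1, hc2⟩ := h
      have := hfree q hq
      omega

-- B's fold equals the maximal content runs
theorem pvB_fold (f : Nat → Bool) : ∀ n s (acc : List (Nat × Nat)),
    (pvFinish (s + n) ((List.range' s n).foldl (pvStep f) (acc, none)) =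
      acc ++ pvFr ((List.range' s n).map f) s) ∧
    (∀ s0, pvFinish (s + n) ((List.range' s n).foldl (pvStep f) (acc, some s0)) =
      acc ++ (s0, s + pvTakeFalse ((List.range' s n).map f)) ::
        pvFr (((List.range' s n).map f).drop (pvTakeFalse ((List.range' s n).map f)))
          (s + pvTakeFalse ((List.range' s n).map f))) := by
  intro n
  induction n with
  | zero =>
    intro s acc
    refine ⟨by simp [pvFinish, pvFr_nil], fun s0 => ?_⟩
    simp [pvFinish, pvFr_nil, pvTakeFalse]
  | succ n ih =>
    intro s acc
    have hr : List.range' s (n + 1) = s :: List.range' (s + 1) n := by simp [List.range'_succ]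
    have e : s + (n + 1) = (s + 1) + n := by omega
    constructor
    · rw [hr]
      simp only [List.foldl_cons, List.map_cons]
      cases hf : f s with
      | true =>
        have hst : pvStep f (acc, none) s = (acc, none) := by simp [pvStep, hf]
        rw [hst, e, (ih (s + 1) acc).1]
        simp [pvFr_true_cons]
      | false =>
        have hst : pvStep f (acc, none) s = (acc, some s) := by simp [pvStep, hf]
        rw [hst, e, (ih (s + 1) acc).2 s]
        simp [pvFr_false_cons]
    · intro s0
      rw [hr]
      simp only [List.foldl_cons, List.map_cons]
      cases hf : f s with
      | true =>
        have hst : pvStep f (acc, some s0) s = (acc ++ [(s0, s)], none) := by simp [pvStep, hf]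
        rw [hst, e, (ih (s + 1) (acc ++ [(s0, s)])).1]
        simp [pvTakeFalse, pvFr_true_cons]
      | false =>
        have hst : pvStep f (acc, some s0) s = (acc, some s0) := by simp [pvStep, hf]
        rw [hst, e, (ih (s + 1) acc).2 s0]
        simp only [pvTakeFalse, List.drop_succ_cons]
        have e2 : s + (pvTakeFalse (List.map f (List.range' (s + 1) n)) + 1)
            = (s + 1) + pvTakeFalse (List.map f (List.range' (s + 1) n)) := by omega
        rw [e2]

-- ===== VERDICT (by name: the statement is the Claim_ definition above) =====
theorem split_into_grid_columns_spec : Claim_equal_split_into_grid_columns := by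
  intro block _
  unfold Spec_split_into_grid_columns
  rw [split_into_grid_columns, split_into_grid_columns_alt]
  by_cases hb : block = []
  · simp [hb]
  · rw [if_neg hb, if_neg hb]
    simp only
    generalize ((block.map (fun l => l.toList.length)).max?).getD 0 = width
    generalize block.map (fun l => l.toList ++ List.replicate (width - l.toList.length) ' ') = padded
    congr 1
    have hB := (pvB_fold (fun i => padded.all (fun p => p.getD i ' ' == ' ')) width 0 []).1
    rw [Nat.zero_add, List.nil_append] at hB
    rw [← List.range_eq_range'] at hB
    have hA := pvA_main ((List.range width).map (fun i => padded.all (fun p => p.getD i ' ' == ' ')))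
    rw [List.length_map, List.length_range] at hA
    rw [hA, ← hB]
    rfl
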